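-- pv_equiv track=rewrite | github.com/LorenzoLMP/TD2015 | week-12/clk_plot.py | jk_div2
-- ===== SOURCE A (Python) =====
-- def jk(clk, j0, k0, q0):
--     if (clk == 1):
--         if (j0 != k0):
--             return [j0, k0, j0] #il terzo è qnuovo
--         elif ((j0== 0) & (k0 == 0)):
--             return [j0, k0, q0]
--         else:
--             return [j0, k0, (q0+1)%2] #q0 negato
--     else:
--         return [j0, k0, q0]
--
-- def jk_div2(clk, q_start):
--     div_2 = []
--     q0 = q_start
--     for i in range(len(clk)):
--         a = jk(clk[i], 1, 1, q0)
--         div_2.append(a[2])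
--         q0 = a[2]
--     return div_2
-- ===== SOURCE B (Python) =====
-- def jk_div2(clk, q_start):
--     # run-length recursion: the output is constant between clock-high samples,
--     # so locate the first 1, emit that constant run plus the toggled value,
--     # and recurse on the remaining slice with the new state.
--     if 1 not in clk:
--         return [q_start] * len(clk)
--     i = clk.index(1)
--     q = (q_start + 1) % 2
--     return [q_start] * i + [q] + jk_div2(clk[i + 1:], q)
-- ===== Notes on version B (the rewrite author's own statement) =====
-- stated objective: alternative
-- what changed: Replaces the per-element loop that re-feeds a mutable q0 through the jk helper with run-length recursion: find the next clock-high sample with list.index, emit the constant run before it and the toggled value in one step, and recurse on the remaining slice (runs are built by C-level list.index/repetition instead of per-element Python steps).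
import Mathlib
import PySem

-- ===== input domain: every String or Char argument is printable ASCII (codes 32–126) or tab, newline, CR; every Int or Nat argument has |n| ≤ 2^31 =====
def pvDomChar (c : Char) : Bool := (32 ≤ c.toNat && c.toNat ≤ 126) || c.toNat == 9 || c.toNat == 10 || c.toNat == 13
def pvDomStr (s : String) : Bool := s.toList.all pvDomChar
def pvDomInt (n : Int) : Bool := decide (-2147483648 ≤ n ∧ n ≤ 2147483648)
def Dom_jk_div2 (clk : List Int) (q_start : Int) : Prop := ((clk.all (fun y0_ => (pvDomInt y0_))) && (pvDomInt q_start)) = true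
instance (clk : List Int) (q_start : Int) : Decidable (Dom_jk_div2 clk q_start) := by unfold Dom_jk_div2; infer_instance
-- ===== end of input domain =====

-- B replaces A's per-element mutable-state loop by run-length recursion on the slice
-- after each clock-high sample (alternative decomposition, same cost).

-- ===== PORT A =====
def jk (clk j0 k0 q0 : Int) : List Int :=
  if clk = 1 then
    if j0 ≠ k0 then [j0, k0, j0]
    else if j0 = 0 ∧ k0 = 0 then [j0, k0, q0]
    else [j0, k0, PySem.Int.mod (q0 + 1) 2]
  else [j0, k0, q0]

def jkStepA (st : List Int × Int) (c : Int) : List Int × Int :=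
  let a := jk c 1 1 st.2
  (st.1 ++ [PySem.List.pyGetD a 2 0], PySem.List.pyGetD a 2 0)

def jk_div2 (clk : List Int) (q_start : Int) : List Int :=
  ((PySem.List.pyRange 0 (PySem.List.len clk) 1).foldl
      (fun st i => jkStepA st (PySem.List.pyGetD clk i 0))
      ([], q_start)).1

-- ===== PORT B =====
-- 'if 1 not in clk' and the subsequent 'clk.index(1)' are ported together as one
-- match on PySem.List.index? (none ↔ 1 ∉ clk; clk.index(1) never raises in the branch).
def jk_div2_alt (clk : List Int) (q_start : Int) : List Int :=
  match h : PySem.List.index? clk 1 with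
  | none => List.replicate clk.length q_start
  | some i =>
      let q := PySem.Int.mod (q_start + 1) 2
      List.replicate i q_start ++ [q] ++
        jk_div2_alt (PySem.List.slice clk (some ((i : Int) + 1)) none) q
termination_by clk.length
decreasing_by
  obtain ⟨hi, _, _⟩ := PySem.List.getElem_of_index?_eq_some h
  have : ((i : Int) + 1) = ((i + 1 : Nat) : Int) := by push_cast; ring
  rw [this, PySem.List.slice_from_natCast, List.length_drop]
  omega

-- ===== PRECONDITION & SPEC =====
def Spec_jk_div2 (clk : List Int) (q_start : Int) (out : List Int) : Prop := out = jk_div2_alt clk q_start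
instance (clk : List Int) (q_start : Int) (out : List Int) : Decidable (Spec_jk_div2 clk q_start out) := by unfold Spec_jk_div2; infer_instance

-- ===== CLAIM (what is proved, stated in full; the proofs are below) =====
def Claim_equal_jk_div2 : Prop := ∀ (clk : List Int) (q_start : Int), Dom_jk_div2 clk q_start → Spec_jk_div2 clk q_start (jk_div2 clk q_start)

-- ===== LEMMAS AND PROOFS =====

-- canonical state sequence: q' :: … where q' toggles on each clock-high element
def specSeq : List Int → Int → List Int
  | [], _ => []
  | c :: cs, q =>
    let q' := if c = 1 then PySem.Int.mod (q + 1) 2 else q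
    q' :: specSeq cs q'

lemma jk_one_one (c q : Int) :
    jk c 1 1 q = if c = 1 then [1, 1, PySem.Int.mod (q + 1) 2] else [1, 1, q] := by
  simp [jk]

lemma foldlA_eq_specSeq (clk : List Int) :
    ∀ (acc : List Int) (q : Int),
      (clk.foldl jkStepA (acc, q)).1 = acc ++ specSeq clk q := by
  induction clk with
  | nil => intro acc q; simp [specSeq]
  | cons c cs ih =>
    intro acc q
    simp only [List.foldl_cons, specSeq]
    by_cases hc : c = 1
    · have : jkStepA (acc, q) c
          = (acc ++ [PySem.Int.mod (q + 1) 2], PySem.Int.mod (q + 1) 2) := by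
        simp [jkStepA, jk_one_one, hc, PySem.List.pyGetD]
      rw [this, ih]
      simp [hc]
    · have : jkStepA (acc, q) c = (acc ++ [q], q) := by
        simp [jkStepA, jk_one_one, hc, PySem.List.pyGetD]
      rw [this, ih]
      simp [hc]

lemma specSeq_no_one (clk : List Int) (q : Int) (h : (1 : Int) ∉ clk) :
    specSeq clk q = List.replicate clk.length q := by
  induction clk with
  | nil => simp [specSeq]
  | cons c cs ih =>
    have hc : c ≠ 1 := fun hc => h (hc ▸ List.mem_cons_self)
    simp only [specSeq, if_neg hc, List.length_cons, List.replicate_succ]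
    exact congrArg _ (ih (fun hm => h (List.mem_cons_of_mem _ hm)))

lemma specSeq_append_no_one (pre : List Int) (rest : List Int) (q : Int)
    (h : (1 : Int) ∉ pre) :
    specSeq (pre ++ rest) q = List.replicate pre.length q ++ specSeq rest q := by
  induction pre with
  | nil => simp
  | cons c cs ih =>
    have hc : c ≠ 1 := fun hc => h (hc ▸ List.mem_cons_self)
    simp only [List.cons_append, specSeq, if_neg hc, List.length_cons,
      List.replicate_succ, List.cons_append]
    exact congrArg _ (ih (fun hm => h (List.mem_cons_of_mem _ hm)))

lemma alt_eq_specSeq (clk : List Int) (q : Int) :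
    jk_div2_alt clk q = specSeq clk q := by
  induction hn : clk.length using Nat.strong_induction_on generalizing clk q with
  | _ n ih =>
    rw [jk_div2_alt]
    cases h : PySem.List.index? clk 1 with
    | none =>
      have h1 : (1 : Int) ∉ clk := (PySem.List.index?_eq_none_iff clk 1).1 h
      rw [specSeq_no_one clk q h1]
    | some i =>
      obtain ⟨pre, suf, hclk, hlen, hnot⟩ := (PySem.List.index?_eq_some_iff clk 1 i).1 h
      have hcast : ((i : Int) + 1) = ((i + 1 : Nat) : Int) := by push_cast; ring
      have hdrop : PySem.List.slice clk (some ((i : Int) + 1)) none = suf := by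
        rw [hcast, PySem.List.slice_from_natCast, hclk, ← hlen]
        simp
      have hrec : jk_div2_alt suf (PySem.Int.mod (q + 1) 2)
          = specSeq suf (PySem.Int.mod (q + 1) 2) := by
        refine ih suf.length ?_ suf _ rfl
        subst hclk hn; simp; omega
      dsimp only
      rw [hdrop, hrec, hclk,
        specSeq_append_no_one pre (1 :: suf) q hnot, hlen]
      simp [specSeq]

-- ===== VERDICT (by name: the statement is the Claim_ definition above) =====
theorem jk_div2_spec : Claim_equal_jk_div2 := by
  intro clk q_start _
  unfold Spec_jk_div2 jk_div2
  rw [PySem.List.foldl_pyRange_zero_pyGetD clk 0 jkStepA ([], q_start)]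
  rw [foldlA_eq_specSeq clk [] q_start, alt_eq_specSeq]
  simp
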